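-- pv_equiv track=rewrite | github.com/dudtj5307/Coding_skills | 프로그래머스/lv2/87946. 피로도/피로도.py | solution
-- ===== SOURCE A (Python) =====
-- from itertools import permutations
--
-- def solution(k, dungeons):
--     cases = list(permutations(dungeons, len(dungeons)))
--     answer = []
--     for case in cases:
--         explore = 0
--         life = k
--         for a, b in case:
--             if life >= a:
--                 life -= b
--                 explore += 1
--         answer.append(explore)
--     return max(answer)
-- ===== SOURCE B (Python) =====
-- def solution(k, dungeons):
--     # recursive DFS/backtracking: try each clearable dungeon, recurse on the rest
--     best = 0
--     for i in range(len(dungeons)):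
--         a, b = dungeons[i]
--         if k >= a:
--             best = max(best, 1 + solution(k - b, dungeons[:i] + dungeons[i+1:]))
--     return best
-- ===== Notes on version B (the rewrite author's own statement) =====
-- stated objective: alternative
-- what changed: A materialises all n! permutations and greedily simulates each, taking the max; B is a recursive DFS/backtracking that branches only on currently clearable dungeons and returns the max of 1 + the recursive result.
import Mathlib
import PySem

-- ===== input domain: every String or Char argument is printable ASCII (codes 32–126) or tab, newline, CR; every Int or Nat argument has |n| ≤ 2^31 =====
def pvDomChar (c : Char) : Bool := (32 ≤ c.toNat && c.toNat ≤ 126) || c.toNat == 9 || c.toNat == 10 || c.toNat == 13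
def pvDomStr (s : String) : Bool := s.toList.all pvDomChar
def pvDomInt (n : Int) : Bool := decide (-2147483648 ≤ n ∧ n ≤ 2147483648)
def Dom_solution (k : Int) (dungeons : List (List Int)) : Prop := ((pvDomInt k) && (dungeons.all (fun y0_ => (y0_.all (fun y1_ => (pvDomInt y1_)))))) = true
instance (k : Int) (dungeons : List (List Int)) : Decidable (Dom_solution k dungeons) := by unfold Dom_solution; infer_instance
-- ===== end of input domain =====

-- B replaces A's enumeration of all n! permutations by a recursive DFS/backtracking
-- that branches only on currently clearable dungeons (alternative algorithm, same values).

-- ===== PORT A =====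
-- one greedy step of A's inner loop: state is (explore, life)
def aStep (st : Int × Int) (row : List Int) : Int × Int :=
  match row with
  | [a, b] => if st.2 ≥ a then (st.1 + 1, st.2 - b) else st
  | _ => st  -- unreachable under Pre_solution (Python raises ValueError on a row of length ≠ 2)

def solution (k : Int) (dungeons : List (List Int)) : Int :=
  let cases := PySem.List.permutations dungeons dungeons.length
  let answer := cases.map (fun case => (case.foldl aStep (0, k)).1)
  -- answer is nonempty (permutations of a list is never empty), so the default is never used
  (PySem.List.max? answer (fun x => x)).getD 0

-- ===== PORT B =====
mutual
def solution_alt (k : Int) (dungeons : List (List Int)) : Int :=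
  altLoop k dungeons 0 0
termination_by (dungeons.length, dungeons.length + 2)
-- B's `for i in range(len(dungeons))` loop with accumulator `best`
def altLoop (k : Int) (dungeons : List (List Int)) (i : Nat) (best : Int) : Int :=
  if h : i < dungeons.length then
    match dungeons[i] with
    | [a, b] =>
        if k ≥ a then
          altLoop k dungeons (i + 1) (max best (1 + solution_alt (k - b) (dungeons.eraseIdx i)))
        else altLoop k dungeons (i + 1) best
    | _ => altLoop k dungeons (i + 1) best  -- unreachable under Pre_solution (Python raises ValueError)
  else best
termination_by (dungeons.length, dungeons.length + 1 - i)
decreasing_by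
  all_goals first
    | exact Prod.Lex.left _ _ (by simp [List.length_eraseIdx, h]; omega)
    | exact Prod.Lex.right _ (by omega)
end

-- ===== PRECONDITION & SPEC =====
-- Pre_ excludes inputs with a row whose length is not 2: there Python A (and Python B) raise ValueError.
def Pre_solution (k : Int) (dungeons : List (List Int)) : Prop :=
  ∀ row ∈ dungeons, row.length = 2
instance (k : Int) (dungeons : List (List Int)) : Decidable (Pre_solution k dungeons) := by
  unfold Pre_solution; infer_instance

def pvWitness_solution : Int × List (List Int) := (80, [[80, 20], [50, 40], [30, 10]])

def Spec_solution (k : Int) (dungeons : List (List Int)) (out : Int) : Prop := out = solution_alt k dungeons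
instance (k : Int) (dungeons : List (List Int)) (out : Int) : Decidable (Spec_solution k dungeons out) := by unfold Spec_solution; infer_instance

-- ===== CLAIM (what is proved, stated in full; the proofs are below) =====
def Claim_equal_solution : Prop := ∀ (k : Int) (dungeons : List (List Int)), Dom_solution k dungeons → Pre_solution k dungeons → Spec_solution k dungeons (solution k dungeons)

-- ===== LEMMAS AND PROOFS =====

-- greedy count of A's inner loop, as a structural recursion
def greedyCount (life : Int) : List (List Int) → Int
  | [] => 0
  | row :: rest =>
    match row with
    | [a, b] => if life ≥ a then 1 + greedyCount (life - b) rest else greedyCount life rest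
    | _ => greedyCount life rest

theorem greedyCount_nonneg (p : List (List Int)) : ∀ life, 0 ≤ greedyCount life p := by
  induction p with
  | nil => intro life; simp [greedyCount]
  | cons row rest ih =>
    intro life
    match row with
    | [a, b] =>
      simp only [greedyCount]
      split_ifs with h
      · have := ih (life - b); omega
      · exact ih life
    | [] => simpa [greedyCount] using ih life
    | [a] => simpa [greedyCount] using ih life
    | a :: b :: c :: t => simpa [greedyCount] using ih life

theorem foldl_aStep_fst (case : List (List Int)) :
    ∀ (e life : Int), (case.foldl aStep (e, life)).1 = e + greedyCount life case := by
  induction case with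
  | nil => intro e life; simp [greedyCount]
  | cons row rest ih =>
    intro e life
    match row with
    | [a, b] =>
      simp only [List.foldl_cons, aStep, greedyCount]
      split_ifs with h
      · rw [ih]; ring
      · rw [ih]
    | [] => simp only [List.foldl_cons, aStep, greedyCount]; exact ih e life
    | [a] => simp only [List.foldl_cons, aStep, greedyCount]; exact ih e life
    | a :: b :: c :: t => simp only [List.foldl_cons, aStep, greedyCount]; exact ih e life

-- ----- loop characterisation of altLoop -----

theorem altLoop_ge_best :
    ∀ (m : Nat) (k : Int) (d : List (List Int)) (i : Nat) (best : Int),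
      d.length - i ≤ m → best ≤ altLoop k d i best := by
  intro m
  induction m with
  | zero =>
    intro k d i best hm
    rw [altLoop.eq_def]
    split
    · omega
    · exact le_refl _
  | succ m ih =>
    intro k d i best hm
    rw [altLoop.eq_def]
    split
    · rename_i h
      split
      · split_ifs with hk
        · exact le_trans (le_max_left _ _) (ih k d (i+1) _ (by omega))
        · exact ih k d (i+1) best (by omega)
      · exact ih k d (i+1) best (by omega)
    · exact le_refl _

theorem solution_alt_nonneg (k : Int) (d : List (List Int)) : 0 ≤ solution_alt k d := by
  rw [solution_alt.eq_def]
  exact altLoop_ge_best d.length k d 0 0 (by omega)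

-- every candidate index j ≥ i bounds the loop result from below
theorem altLoop_candidate_le :
    ∀ (m : Nat) (k : Int) (d : List (List Int)) (i : Nat) (best : Int) (j : Nat) (a b : Int),
      d.length - i ≤ m → i ≤ j → d[j]? = some [a, b] → k ≥ a →
      1 + solution_alt (k - b) (d.eraseIdx j) ≤ altLoop k d i best := by
  intro m
  induction m with
  | zero =>
    intro k d i best j a b hm hij hj hk
    have hlt := (List.getElem?_eq_some_iff.mp hj).1
    omega
  | succ m ih =>
    intro k d i best j a b hm hij hj hk
    have hjlen : j < d.length := (List.getElem?_eq_some_iff.mp hj).1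
    have hi : i < d.length := by omega
    rw [altLoop.eq_def]
    rw [dif_pos hi]
    by_cases hji : j = i
    · subst hji
      have : d[j] = [a, b] := by
        have := (List.getElem?_eq_some_iff.mp hj).2
        simpa using this
      rw [this]
      show 1 + solution_alt (k - b) (d.eraseIdx j) ≤
        if k ≥ a then altLoop k d (j + 1) (max best (1 + solution_alt (k - b) (d.eraseIdx j)))
        else altLoop k d (j + 1) best
      rw [if_pos hk]
      exact le_trans (le_max_right _ _)
        (altLoop_ge_best (m + 1) k d (j + 1) _ (by omega))
    · have hij' : i + 1 ≤ j := by omega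
      split
      · split_ifs with hk'
        · exact ih k d (i+1) _ j a b (by omega) hij' hj hk
        · exact ih k d (i+1) best j a b (by omega) hij' hj hk
      · exact ih k d (i+1) best j a b (by omega) hij' hj hk

-- the loop result is either the accumulator or an achieved candidate
theorem altLoop_achieved :
    ∀ (m : Nat) (k : Int) (d : List (List Int)) (i : Nat) (best : Int),
      d.length - i ≤ m →
      altLoop k d i best = best ∨
        ∃ (j : Nat) (a b : Int), i ≤ j ∧ d[j]? = some [a, b] ∧ k ≥ a ∧
          altLoop k d i best = 1 + solution_alt (k - b) (d.eraseIdx j) := by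
  intro m
  induction m with
  | zero =>
    intro k d i best hm
    left
    rw [altLoop.eq_def]
    rw [dif_neg (by omega)]
  | succ m ih =>
    intro k d i best hm
    by_cases hi : i < d.length
    · rw [altLoop.eq_def, dif_pos hi]
      have hnext : ∀ (b' : Int),
          altLoop k d (i+1) b' = b' ∨
            ∃ (j : Nat) (a b : Int), i ≤ j ∧ d[j]? = some [a, b] ∧ k ≥ a ∧
              altLoop k d (i+1) b' = 1 + solution_alt (k - b) (d.eraseIdx j) := by
        intro b'
        rcases ih k d (i+1) b' (by omega) with h | ⟨j, a, b, hij, hja, hka, hres⟩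
        · exact Or.inl h
        · exact Or.inr ⟨j, a, b, by omega, hja, hka, hres⟩
      split
      · rename_i a b heq
        split_ifs with hk
        · rcases hnext (max best (1 + solution_alt (k - b) (d.eraseIdx i))) with h | h
          · rw [h]
            rcases max_cases best (1 + solution_alt (k - b) (d.eraseIdx i)) with ⟨h1, _⟩ | ⟨h1, _⟩
            · exact Or.inl h1
            · refine Or.inr ⟨i, a, b, le_refl i, ?_, hk, h1⟩
              rw [List.getElem?_eq_some_iff]
              exact ⟨hi, heq⟩
          · exact Or.inr h
        · exact hnext best
      · exact hnext best
    · left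
      rw [altLoop.eq_def, dif_neg hi]

-- ----- erase / eraseIdx bookkeeping -----

theorem eraseIdx_perm_erase :
    ∀ (l : List (List Int)) (j : Nat) (x : List Int), l[j]? = some x →
      (l.eraseIdx j).Perm (l.erase x) := by
  intro l
  induction l with
  | nil => intro j x h; simp at h
  | cons y t ih =>
    intro j x h
    match j with
    | 0 =>
      simp at h
      subst h
      simp [List.eraseIdx, List.erase_cons_head]
    | Nat.succ j =>
      simp only [List.getElem?_cons_succ] at h
      have hx : x ∈ t := List.mem_of_getElem? h
      by_cases hyx : y = x
      · subst hyx
        simp only [List.eraseIdx_cons_succ, List.erase_cons_head]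
        exact (List.Perm.cons y (ih j y h)).trans (List.perm_cons_erase hx).symm
      · rw [List.erase_cons_tail (by simpa using hyx)]
        exact List.Perm.cons y (ih j x h)

-- ----- monotonicity: a subpermutation cannot explore more -----

theorem solution_alt_mono :
    ∀ (n : Nat) (l' l : List (List Int)) (k : Int),
      l.length ≤ n → l'.Subperm l → solution_alt k l' ≤ solution_alt k l := by
  intro n
  induction n with
  | zero =>
    intro l' l k hl hsub
    have : l = [] := by
      cases l with
      | nil => rfl
      | cons a t => simp at hl
    subst this
    have : l' = [] := List.subperm_nil.mp hsub
    subst this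
    exact le_refl _
  | succ n ih =>
    intro l' l k hl hsub
    rcases altLoop_achieved l'.length k l' 0 0 (by omega) with h | ⟨j, a, b, _, hja, hka, hres⟩
    · rw [solution_alt.eq_def, h]
      exact solution_alt_nonneg k l
    · rw [solution_alt.eq_def, hres]
      set x : List Int := [a, b] with hx
      have hxl' : x ∈ l' := List.mem_of_getElem? hja
      have hxl : x ∈ l := hsub.subset hxl'
      have hm : l.idxOf x < l.length := List.idxOf_lt_length_of_mem hxl
      have hgm : l[l.idxOf x]? = some x := by
        rw [List.getElem?_eq_some_iff]
        exact ⟨hm, List.getElem_idxOf hm⟩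
      have herase : l.erase x = l.eraseIdx (l.idxOf x) := List.erase_eq_eraseIdx_of_idxOf rfl
      have hsub2 : (l'.eraseIdx j).Subperm (l.erase x) :=
        ((eraseIdx_perm_erase l' j x hja).subperm).trans (List.Subperm.erase x hsub)
      have hlen2 : (l.erase x).length ≤ n := by
        rw [List.length_erase_of_mem hxl]; omega
      have h1 : solution_alt (k - b) (l'.eraseIdx j) ≤ solution_alt (k - b) (l.erase x) :=
        ih _ _ _ hlen2 hsub2
      have h2 : 1 + solution_alt (k - b) (l.eraseIdx (l.idxOf x)) ≤ altLoop k l 0 0 :=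
        altLoop_candidate_le l.length k l 0 0 (l.idxOf x) a b (by omega) (Nat.zero_le _) hgm hka
      have h4 : solution_alt k l = altLoop k l 0 0 := by rw [solution_alt.eq_def]
      rw [herase] at h1
      omega

-- ----- upper bound: every permutation's greedy count ≤ B -----

theorem greedy_le_alt :
    ∀ (p l : List (List Int)) (k : Int), p.Perm l → greedyCount k p ≤ solution_alt k l := by
  intro p
  induction p with
  | nil =>
    intro l k hp
    have : l = [] := hp.symm.eq_nil
    subst this
    simpa [greedyCount] using solution_alt_nonneg k []
  | cons r p' ih =>
    intro l k hp
    have hr : r ∈ l := hp.subset (List.mem_cons_self ..)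
    have hperm' : p'.Perm (l.erase r) :=
      List.Perm.cons_inv (hp.trans (List.perm_cons_erase hr))
    have hsubp' : (l.erase r).Subperm l := (List.erase_sublist ..).subperm
    have hmono : solution_alt k (l.erase r) ≤ solution_alt k l :=
      solution_alt_mono l.length _ _ k (le_refl _) hsubp'
    have hm : l.idxOf r < l.length := List.idxOf_lt_length_of_mem hr
    have hgm : l[l.idxOf r]? = some r := by
      rw [List.getElem?_eq_some_iff]
      exact ⟨hm, List.getElem_idxOf hm⟩
    have herase : l.erase r = l.eraseIdx (l.idxOf r) := List.erase_eq_eraseIdx_of_idxOf rfl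
    match r with
    | [a, b] =>
      by_cases hk : k ≥ a
      · have h1 : greedyCount k ([a, b] :: p') = 1 + greedyCount (k - b) p' := by
          simp [greedyCount, hk]
        have h2 : greedyCount (k - b) p' ≤ solution_alt (k - b) (l.erase [a, b]) :=
          ih _ _ hperm'
        have h3 : 1 + solution_alt (k - b) (l.eraseIdx (l.idxOf [a, b])) ≤ altLoop k l 0 0 :=
          altLoop_candidate_le l.length k l 0 0 _ a b (by omega) (Nat.zero_le _) hgm hk
        rw [h1, solution_alt]
        rw [herase] at h2
        omega
      · have h1 : greedyCount k ([a, b] :: p') = greedyCount k p' := by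
          simp [greedyCount, hk]
        rw [h1]
        exact le_trans (ih _ _ hperm') hmono
    | [] =>
      simp only [greedyCount]
      exact le_trans (ih _ _ hperm') hmono
    | [a] =>
      simp only [greedyCount]
      exact le_trans (ih _ _ hperm') hmono
    | a :: b :: c :: t =>
      simp only [greedyCount]
      exact le_trans (ih _ _ hperm') hmono

-- ----- the permutations list and achievement of B's value -----

theorem exists_mem_permutations :
    ∀ (n : Nat) (l : List (List Int)), l.length ≤ n →
      ∃ p, p ∈ PySem.List.permutations l l.length := by
  intro n
  induction n with
  | zero =>
    intro l hl
    have : l = [] := by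
      cases l with
      | nil => rfl
      | cons a t => simp at hl
    subst this
    exact ⟨[], by simp⟩
  | succ n ih =>
    intro l hl
    match l with
    | [] => exact ⟨[], by simp⟩
    | x :: t =>
      obtain ⟨q, hq⟩ := ih t (by simpa using Nat.lt_succ_iff.mp (by simpa using hl))
      refine ⟨x :: q, ?_⟩
      have hlen : (x :: t).length = t.length + 1 := by simp
      rw [hlen, PySem.List.permutations.eq_2]
      apply List.mem_flatMap.mpr
      refine ⟨0, by simp, ?_⟩
      simp only [List.getElem?_cons_zero, List.eraseIdx_cons_zero]
      exact List.mem_map.mpr ⟨q, hq, rfl⟩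

theorem cons_mem_permutations (l : List (List Int)) (j : Nat) (x : List Int) (p' : List (List Int))
    (hj : l[j]? = some x)
    (hp' : p' ∈ PySem.List.permutations (l.eraseIdx j) (l.eraseIdx j).length) :
    (x :: p') ∈ PySem.List.permutations l l.length := by
  have hjlen : j < l.length := (List.getElem?_eq_some_iff.mp hj).1
  have hlen : l.length = (l.length - 1) + 1 := by omega
  rw [hlen, PySem.List.permutations.eq_2]
  apply List.mem_flatMap.mpr
  refine ⟨j, by simp; omega, ?_⟩
  rw [hj]
  have : (l.eraseIdx j).length = l.length - 1 := by
    simp [List.length_eraseIdx, hjlen]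
  rw [this] at hp'
  exact List.mem_map.mpr ⟨p', hp', rfl⟩

theorem alt_achieved :
    ∀ (n : Nat) (l : List (List Int)) (k : Int), l.length ≤ n →
      ∃ p, p ∈ PySem.List.permutations l l.length ∧ solution_alt k l ≤ greedyCount k p := by
  intro n
  induction n with
  | zero =>
    intro l k hl
    have : l = [] := by
      cases l with
      | nil => rfl
      | cons a t => simp at hl
    subst this
    refine ⟨[], by simp, ?_⟩
    rw [solution_alt.eq_def, altLoop.eq_def]; simp [greedyCount]
  | succ n ih =>
    intro l k hl
    rcases altLoop_achieved l.length k l 0 0 (by omega) with h | ⟨j, a, b, _, hja, hka, hres⟩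
    · obtain ⟨p, hp⟩ := exists_mem_permutations (n+1) l hl
      refine ⟨p, hp, ?_⟩
      rw [solution_alt.eq_def, h]
      exact greedyCount_nonneg p k
    · have hjlen : j < l.length := (List.getElem?_eq_some_iff.mp hja).1
      have hlen' : (l.eraseIdx j).length ≤ n := by
        simp [List.length_eraseIdx, hjlen]; omega
      obtain ⟨p', hp'mem, hp'⟩ := ih (l.eraseIdx j) (k - b) hlen'
      refine ⟨[a, b] :: p', cons_mem_permutations l j [a, b] p' hja hp'mem, ?_⟩
      have : greedyCount k ([a, b] :: p') = 1 + greedyCount (k - b) p' := by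
        simp [greedyCount, hka]
      rw [solution_alt.eq_def, hres, this]
      omega

-- ===== VERDICT (by name: the statement is the Claim_ definition above) =====
theorem solution_spec : Claim_equal_solution := by
  intro k dungeons _ _
  unfold Spec_solution solution
  simp only []
  set cases := PySem.List.permutations dungeons dungeons.length with hcases
  set answer := cases.map (fun case => (case.foldl aStep (0, k)).1) with hanswer
  obtain ⟨p0, hp0mem, hp0⟩ := alt_achieved dungeons.length dungeons k (le_refl _)
  have hne : answer ≠ [] := by
    intro h
    rw [hanswer] at h
    rcases List.map_eq_nil_iff.mp h with h'
    rw [hcases] at h'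
    rw [h'] at hp0mem
    simp at hp0mem
  obtain ⟨m, hm⟩ : ∃ m, PySem.List.max? answer (fun x => x) = some m := by
    cases h : PySem.List.max? answer (fun x => x) with
    | none => exact absurd ((PySem.List.max?_eq_none_iff answer _).mp h) hne
    | some m => exact ⟨m, rfl⟩
  rw [hm]
  simp only [Option.getD_some]
  -- m ≤ solution_alt : m is some permutation's greedy count
  have hmem := PySem.List.max?_mem hm
  rw [hanswer] at hmem
  obtain ⟨p, hpmem, hpv⟩ := List.mem_map.mp hmem
  have hup : m ≤ solution_alt k dungeons := by
    rw [← hpv, foldl_aStep_fst, zero_add]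
    exact greedy_le_alt p dungeons k (PySem.List.perm_of_mem_permutations hpmem)
  -- solution_alt ≤ m : the achieved permutation's greedy count is in answer
  have hdown : solution_alt k dungeons ≤ m := by
    have hin : (p0.foldl aStep (0, k)).1 ∈ answer := by
      rw [hanswer]
      exact List.mem_map.mpr ⟨p0, hp0mem, rfl⟩
    have := PySem.List.max?_isMax hm _ hin
    rw [foldl_aStep_fst, zero_add] at this
    omega
  omega
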